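-- pv_equiv track=rewrite | github.com/alek-netizen/amharic-conjugator | sync_verbs_folders.py | merge_verbs
-- ===== SOURCE A (Python) =====
-- def is_verb_object(obj):
--     """Check if an object looks like a verb (has 'english' key or tense keys)"""
--     if not isinstance(obj, dict):
--         return False
--     # Check for common verb keys
--     verb_keys = ['english', 'perfect', 'imperfective_compound', 'gerund', 'compound_gerund',
--                  'jussive_imperative', 'negative_perfect', 'negative_imperfective',
--                  'negative_jussive_imperative', 'infinitive']
--     return any(key in obj for key in verb_keys)
--
-- def merge_verbs(target_dict, source_dict):
--     """
--     Merge source verbs into target dict.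
--     Source verbs take precedence (update existing), but we don't delete verbs from target.
--     Returns count of verbs added/updated.
--     """
--     updated_count = 0
--     added_count = 0
--
--     for verb_key, verb_data in source_dict.items():
--         if not is_verb_object(verb_data):
--             continue  # Skip non-verb entries
--
--         if verb_key in target_dict:
--             # Update existing verb
--             target_dict[verb_key] = verb_data
--             updated_count += 1
--         else:
--             # Add new verb
--             target_dict[verb_key] = verb_data
--             added_count += 1
--
--     return added_count, updated_count
-- ===== SOURCE B (Python) =====
-- VERB_KEYS = frozenset(['english', 'perfect', 'imperfective_compound', 'gerund', 'compound_gerund',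
--                        'jussive_imperative', 'negative_perfect', 'negative_imperfective',
--                        'negative_jussive_imperative', 'infinitive'])
--
-- def is_verb_object(obj):
--     """Check if an object looks like a verb (has 'english' key or tense keys)"""
--     return isinstance(obj, dict) and not VERB_KEYS.isdisjoint(obj.keys())
--
-- def merge_verbs(target_dict, source_dict):
--     # Count by observing the merge itself: the number of ADDED verbs is exactly
--     # how much the target grew, so no per-key membership test is needed at all.
--     verbs = {k: v for k, v in source_dict.items() if is_verb_object(v)}
--     before = len(target_dict)
--     target_dict.update(verbs)
--     added = len(target_dict) - before
--     return added, len(verbs) - added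
-- ===== Notes on version B (the rewrite author's own statement) =====
-- stated objective: alternative
-- what changed: Instead of A's per-entry loop that tests membership and increments two counters while inserting, B never tests membership at all: it builds the filtered verb dict, performs the merge as one bulk update, and derives added as the observed growth of the target (len after - len before), with updated = len(verbs) - added.
import Mathlib
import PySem

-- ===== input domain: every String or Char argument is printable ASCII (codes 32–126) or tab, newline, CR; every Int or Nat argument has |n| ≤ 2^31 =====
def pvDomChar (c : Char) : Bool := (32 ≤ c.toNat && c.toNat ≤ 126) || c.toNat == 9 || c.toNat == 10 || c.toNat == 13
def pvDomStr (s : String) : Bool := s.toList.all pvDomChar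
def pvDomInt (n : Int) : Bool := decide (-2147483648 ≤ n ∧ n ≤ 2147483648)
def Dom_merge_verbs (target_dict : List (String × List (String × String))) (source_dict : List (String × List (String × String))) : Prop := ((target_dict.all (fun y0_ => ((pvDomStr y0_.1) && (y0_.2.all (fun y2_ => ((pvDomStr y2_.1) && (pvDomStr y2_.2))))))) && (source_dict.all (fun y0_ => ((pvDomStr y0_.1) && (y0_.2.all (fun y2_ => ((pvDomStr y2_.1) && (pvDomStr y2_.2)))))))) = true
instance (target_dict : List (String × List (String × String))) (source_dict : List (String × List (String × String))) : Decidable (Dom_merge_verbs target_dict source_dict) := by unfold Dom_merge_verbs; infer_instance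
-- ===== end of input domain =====

-- B replaces A's membership-testing counter loop by a bulk merge whose ADDED count is read off
-- as the growth of the target's size (no membership test at all); objective: alternative.
-- Both A and B mutate target_dict in place with the same final contents; the equivalence
-- proved here is about the RETURN value only.

-- ===== PORT A =====
def pvVerbKeys : List String :=
  ["english", "perfect", "imperfective_compound", "gerund", "compound_gerund",
   "jussive_imperative", "negative_perfect", "negative_imperfective",
   "negative_jussive_imperative", "infinitive"]

-- is_verb_object: any(key in obj for key in verb_keys) (obj is a dict here, so isinstance is True)
def is_verb_object (obj : List (String × String)) : Bool :=
  pvVerbKeys.any (fun k => obj.any (fun p => p.1 == k))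

-- the loop body: state = (mutating target dict, added_count, updated_count)
def pvStepA (st : PySem.Dict String (List (String × String)) × Int × Int)
    (kv : String × List (String × String)) :
    PySem.Dict String (List (String × String)) × Int × Int :=
  if !(is_verb_object kv.2) then st
  else if st.1.contains kv.1 then (st.1.insert kv.1 kv.2, st.2.1, st.2.2 + 1)
  else (st.1.insert kv.1 kv.2, st.2.1 + 1, st.2.2)

def merge_verbs (target_dict : List (String × List (String × String))) (source_dict : List (String × List (String × String))) : Int × Int :=
  (source_dict.foldl pvStepA (PySem.Dict.mk target_dict, 0, 0)).2

-- ===== PORT B =====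
-- B's is_verb_object: isinstance(obj, dict) and not VERB_KEYS.isdisjoint(obj.keys())
def is_verb_object_b (obj : List (String × String)) : Bool :=
  !(PySem.Set.isdisjoint (PySem.Set.ofList pvVerbKeys) (obj.map Prod.fst))

-- the dict comprehension {k: v for k, v in source_dict.items() if is_verb_object(v)}
def pvStepB (d : PySem.Dict String (List (String × String)))
    (kv : String × List (String × String)) : PySem.Dict String (List (String × String)) :=
  if is_verb_object_b kv.2 then d.insert kv.1 kv.2 else d

def merge_verbs_alt (target_dict : List (String × List (String × String))) (source_dict : List (String × List (String × String))) : Int × Int :=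
  let verbs := source_dict.foldl pvStepB PySem.Dict.empty
  let before : Int := (PySem.Dict.mk target_dict).size          -- before = len(target_dict)
  let merged := (PySem.Dict.mk target_dict).update verbs.items  -- target_dict.update(verbs)
  let added : Int := (merged.size : Int) - before               -- added = len(target_dict) - before
  (added, (verbs.size : Int) - added)

-- ===== PRECONDITION & SPEC =====
-- Pre_ excludes source lists whose keys repeat: a Python dict cannot have duplicate keys, so
-- such association lists do not encode any input the Python functions can receive, and the two
-- ports' assoc-list readings of them are accidental.
def Pre_merge_verbs (target_dict : List (String × List (String × String))) (source_dict : List (String × List (String × String))) : Prop :=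
  (source_dict.map Prod.fst).Nodup
instance (target_dict : List (String × List (String × String))) (source_dict : List (String × List (String × String))) : Decidable (Pre_merge_verbs target_dict source_dict) := by unfold Pre_merge_verbs; infer_instance

def pvWitness_merge_verbs : (List (String × List (String × String))) × (List (String × List (String × String))) :=
  ([("go", [("english", "to go")])],
   [("go", [("english", "to go"), ("perfect", "hede")]), ("eat", [("english", "to eat")]), ("x", [("y", "z")])])

def Spec_merge_verbs (target_dict : List (String × List (String × String))) (source_dict : List (String × List (String × String))) (out : Int × Int) : Prop := out = merge_verbs_alt target_dict source_dict
instance (target_dict : List (String × List (String × String))) (source_dict : List (String × List (String × String))) (out : Int × Int) : Decidable (Spec_merge_verbs target_dict source_dict out) := by unfold Spec_merge_verbs; infer_instance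

-- ===== CLAIM (what is proved, stated in full; the proofs are below) =====
def Claim_equal_merge_verbs : Prop := ∀ (target_dict : List (String × List (String × String))) (source_dict : List (String × List (String × String))), Dom_merge_verbs target_dict source_dict → Pre_merge_verbs target_dict source_dict → Spec_merge_verbs target_dict source_dict (merge_verbs target_dict source_dict)

-- ===== LEMMAS AND PROOFS =====

-- the two is_verb_object tests agree
lemma is_verb_eq (obj : List (String × String)) : is_verb_object obj = is_verb_object_b obj := by
  rw [Bool.eq_iff_iff]
  constructor
  · intro hA
    simp only [is_verb_object] at hA
    obtain ⟨k, hk, hkin⟩ := List.any_eq_true.mp hA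
    obtain ⟨p, hp, hpk⟩ := List.any_eq_true.mp hkin
    have hkm : k ∈ obj.map Prod.fst := List.mem_map.mpr ⟨p, hp, by simpa using hpk⟩
    have hks : k ∈ PySem.Set.ofList pvVerbKeys := (PySem.Set.mem_ofList _ _).mpr hk
    simp only [is_verb_object_b, Bool.not_eq_true', Bool.eq_false_iff, ne_eq]
    intro hdis
    exact (PySem.Set.isdisjoint_iff _ _).mp hdis k hks hkm
  · intro hB
    have hdis : PySem.Set.isdisjoint (PySem.Set.ofList pvVerbKeys) (obj.map Prod.fst) = false := by
      simpa [is_verb_object_b] using hB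
    by_contra hA
    have htrue : PySem.Set.isdisjoint (PySem.Set.ofList pvVerbKeys) (obj.map Prod.fst) = true := by
      rw [PySem.Set.isdisjoint_iff]
      intro x hx hxm
      obtain ⟨p, hp, hpx⟩ := List.mem_map.mp hxm
      apply hA
      simp only [is_verb_object]
      exact List.any_eq_true.mpr ⟨x, (PySem.Set.mem_ofList _ _).mp hx,
        List.any_eq_true.mpr ⟨p, hp, by simpa using hpx⟩⟩
    simp [htrue] at hdis

-- A's fold: the two counters, characterised against the INITIAL dict (source keys nodup)
lemma foldA_counts (s : List (String × List (String × String)))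
    (d : PySem.Dict String (List (String × String))) (a u : Int)
    (h : (s.map Prod.fst).Nodup) :
    (s.foldl pvStepA (d, a, u)).2
    = (a + (s.countP (fun kv => is_verb_object kv.2 && !(d.contains kv.1)) : Int),
       u + (s.countP (fun kv => is_verb_object kv.2 && d.contains kv.1) : Int)) := by
  induction s generalizing d a u with
  | nil => simp
  | cons kv s' ih =>
    rw [List.map_cons, List.nodup_cons] at h
    obtain ⟨hkey, h'⟩ := h
    have hcongr : ∀ (v : List (String × String)), ∀ x ∈ s',
        (d.insert kv.1 v).contains x.1 = d.contains x.1 := by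
      intro v x hx
      rw [PySem.Dict.contains_insert]
      have hne : (x.1 == kv.1) = false := by
        simp only [beq_eq_false_iff_ne, ne_eq]
        intro hxk
        exact hkey (hxk ▸ List.mem_map.mpr ⟨x, hx, rfl⟩)
      simp [hne]
    have e1 : s'.countP (fun kv' => is_verb_object kv'.2 && !((d.insert kv.1 kv.2).contains kv'.1))
        = s'.countP (fun kv' => is_verb_object kv'.2 && !(d.contains kv'.1)) :=
      List.countP_congr (fun x hx => by rw [hcongr kv.2 x hx])
    have e2 : s'.countP (fun kv' => is_verb_object kv'.2 && (d.insert kv.1 kv.2).contains kv'.1)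
        = s'.countP (fun kv' => is_verb_object kv'.2 && d.contains kv'.1) :=
      List.countP_congr (fun x hx => by rw [hcongr kv.2 x hx])
    rw [List.foldl_cons]
    by_cases hv : is_verb_object kv.2
    · by_cases hc : d.contains kv.1
      · have hst : pvStepA (d, a, u) kv = (d.insert kv.1 kv.2, a, u + 1) := by
          simp [pvStepA, hv, hc]
        rw [hst, ih _ _ _ h', e1, e2, List.countP_cons, List.countP_cons]
        simp only [hv, hc, Bool.not_true, Bool.and_false, Bool.and_true]
        simp only [Prod.mk.injEq]
        constructor <;> push_cast <;> ring
      · have hc' : d.contains kv.1 = false := by simpa using hc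
        have hst : pvStepA (d, a, u) kv = (d.insert kv.1 kv.2, a + 1, u) := by
          simp [pvStepA, hv, hc']
        rw [hst, ih _ _ _ h', e1, e2, List.countP_cons, List.countP_cons]
        simp only [hv, hc', Bool.not_false, Bool.and_false, Bool.and_true]
        simp only [Prod.mk.injEq]
        constructor <;> push_cast <;> ring
    · have hv' : is_verb_object kv.2 = false := by simpa using hv
      have hst : pvStepA (d, a, u) kv = (d, a, u) := by simp [pvStepA, hv']
      rw [hst, ih _ _ _ h', List.countP_cons, List.countP_cons]
      simp [hv']

-- inserting pairwise-distinct keys into an empty dict keeps the item list as is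
lemma foldl_insert_items (l : List (String × List (String × String)))
    (h : (l.map Prod.fst).Nodup) :
    (l.foldl (fun (d : PySem.Dict String (List (String × String))) kv => d.insert kv.1 kv.2)
      PySem.Dict.empty).items = l := by
  induction l using List.reverseRecOn with
  | nil => rfl
  | append_singleton l kv ih =>
    rw [List.map_append] at h
    have h' : (l.map Prod.fst).Nodup := h.sublist (List.sublist_append_left _ _)
    have hdisj := List.disjoint_of_nodup_append h
    have hkey : kv.1 ∉ l.map Prod.fst := fun hm => hdisj hm (by simp)
    rw [List.foldl_append, List.foldl_cons, List.foldl_nil]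
    have hcon : (l.foldl (fun (d : PySem.Dict String (List (String × String))) kv => d.insert kv.1 kv.2)
        PySem.Dict.empty).contains kv.1 = false := by
      simp only [PySem.Dict.contains, ih h']
      rw [List.any_eq_false]
      intro p hp
      simp only [beq_iff_eq]
      intro hpk
      exact hkey (hpk ▸ List.mem_map.mpr ⟨p, hp, rfl⟩)
    rw [PySem.Dict.items_insert_of_not_contains _ _ hcon, ih h']

-- B's dict-comprehension fold yields exactly the filtered source list (source keys nodup)
lemma foldB_items (s : List (String × List (String × String)))
    (h : (s.map Prod.fst).Nodup) :
    (s.foldl pvStepB PySem.Dict.empty).items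
    = s.filter (fun kv => is_verb_object_b kv.2) := by
  unfold pvStepB
  rw [← List.foldl_filter]
  exact foldl_insert_items _
    ((h.sublist (List.Sublist.map Prod.fst List.filter_sublist) : (_ : List String).Nodup))

-- bulk update over pairwise-distinct keys grows the dict by the number of fresh keys
lemma size_update (l : List (String × List (String × String)))
    (d : PySem.Dict String (List (String × String)))
    (h : (l.map Prod.fst).Nodup) :
    (d.update l).size = d.size + l.countP (fun kv => !(d.contains kv.1)) := by
  induction l generalizing d with
  | nil => rfl
  | cons kv l' ih =>
    rw [List.map_cons, List.nodup_cons] at h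
    obtain ⟨hkey, h'⟩ := h
    have hstep : d.update (kv :: l') = (d.insert kv.1 kv.2).update l' := rfl
    rw [hstep, ih _ h']
    have hcongr : l'.countP (fun kv' => !((d.insert kv.1 kv.2).contains kv'.1))
        = l'.countP (fun kv' => !(d.contains kv'.1)) := by
      apply List.countP_congr
      intro x hx
      rw [PySem.Dict.contains_insert]
      have hne : (x.1 == kv.1) = false := by
        simp only [beq_eq_false_iff_ne, ne_eq]
        intro hxk
        exact hkey (hxk ▸ List.mem_map.mpr ⟨x, hx, rfl⟩)
      simp [hne]
    rw [hcongr, List.countP_cons]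
    by_cases hc : d.contains kv.1
    · rw [PySem.Dict.size_insert]
      simp [hc]
    · have hc' : d.contains kv.1 = false := by simpa using hc
      rw [PySem.Dict.size_insert]
      simp [hc']
      omega

-- ===== VERDICT (by name: the statement is the Claim_ definition above) =====
theorem merge_verbs_spec : Claim_equal_merge_verbs := by
  intro t s _ hnd
  have hnd' : (s.map Prod.fst).Nodup := hnd
  show merge_verbs t s = merge_verbs_alt t s
  have hA := foldA_counts s (PySem.Dict.mk t) 0 0 hnd'
  set l := s.filter (fun kv => is_verb_object_b kv.2) with hl
  have hlnd : (l.map Prod.fst).Nodup :=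
    hnd'.sublist (List.Sublist.map Prod.fst List.filter_sublist)
  have hitems := foldB_items s hnd'
  have hsize : (s.foldl pvStepB PySem.Dict.empty).size = l.length := by
    simp only [PySem.Dict.size, hitems, hl]
  -- the added count B reads off as size growth = A's countP of fresh verb keys
  have hgrow : ((PySem.Dict.mk t).update (s.foldl pvStepB PySem.Dict.empty).items).size
      = (PySem.Dict.mk t).size + s.countP (fun kv => is_verb_object kv.2 && !((PySem.Dict.mk t).contains kv.1)) := by
    rw [hitems, size_update _ _ hlnd, hl, List.countP_filter]
    congr 1
    apply List.countP_congr
    intro x _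
    simp [is_verb_eq, Bool.and_comm]
  -- len(verbs) splits into updated + added
  have hlen : l.length
      = s.countP (fun kv => is_verb_object kv.2 && (PySem.Dict.mk t).contains kv.1)
      + s.countP (fun kv => is_verb_object kv.2 && !((PySem.Dict.mk t).contains kv.1)) := by
    rw [List.length_eq_countP_add_countP
      (fun kv : String × List (String × String) => (PySem.Dict.mk t).contains kv.1) (l := l)]
    congr 1
    · rw [hl, List.countP_filter]
      apply List.countP_congr
      intro x _
      simp [is_verb_eq, Bool.and_comm]
    · rw [hl, List.countP_filter]
      apply List.countP_congr
      intro x _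
      cases hx : (PySem.Dict.mk t).contains x.1 <;> simp [is_verb_eq, Bool.and_comm]
  have hA' : merge_verbs t s
      = (0 + (s.countP (fun kv => is_verb_object kv.2 && !((PySem.Dict.mk t).contains kv.1)) : Int),
         0 + (s.countP (fun kv => is_verb_object kv.2 && (PySem.Dict.mk t).contains kv.1) : Int)) := hA
  rw [hA']
  simp only [merge_verbs_alt, hgrow, hsize, hlen]
  simp only [Prod.mk.injEq]
  constructor <;> push_cast <;> ring
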